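-- pv_equiv track=rewrite | github.com/mahrens917/common | src/common/redis_protocol/market_normalization_helpers/strike_bounds_builder.py | determine_keyword_type
-- ===== SOURCE A (Python) =====
-- from typing import Optional, Tuple
--
-- def determine_keyword_type(tokens: list) -> Optional[str]:
--     """Determine strike keyword type from ticker tokens."""
--     if "BETWEEN" in tokens:
--         return "between"
--     elif any(token in {"LESS", "BELOW"} for token in tokens):
--         return "less"
--     elif any(token in {"GREATER", "ABOVE"} for token in tokens):
--         return "greater"
--     return None
-- ===== SOURCE B (Python) =====
-- _CATEGORY = {'BETWEEN': 'between', 'LESS': 'less', 'BELOW': 'less',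
--              'GREATER': 'greater', 'ABOVE': 'greater'}
-- _PRIORITY = ('between', 'less', 'greater')
--
--
-- def determine_keyword_type(tokens: list):
--     """Determine strike keyword type from ticker tokens."""
--     cats = {_CATEGORY[t] for t in tokens if t in _CATEGORY}
--     for cat in _PRIORITY:
--         if cat in cats:
--             return cat
--     return None
-- ===== Notes on version B (the rewrite author's own statement) =====
-- stated objective: alternative
-- what changed: Replaces three priority-ordered scans of the token list by one pass that maps tokens through a keyword->category dict into a set, then resolves the first present category in the fixed priority order.
import Mathlib
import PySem

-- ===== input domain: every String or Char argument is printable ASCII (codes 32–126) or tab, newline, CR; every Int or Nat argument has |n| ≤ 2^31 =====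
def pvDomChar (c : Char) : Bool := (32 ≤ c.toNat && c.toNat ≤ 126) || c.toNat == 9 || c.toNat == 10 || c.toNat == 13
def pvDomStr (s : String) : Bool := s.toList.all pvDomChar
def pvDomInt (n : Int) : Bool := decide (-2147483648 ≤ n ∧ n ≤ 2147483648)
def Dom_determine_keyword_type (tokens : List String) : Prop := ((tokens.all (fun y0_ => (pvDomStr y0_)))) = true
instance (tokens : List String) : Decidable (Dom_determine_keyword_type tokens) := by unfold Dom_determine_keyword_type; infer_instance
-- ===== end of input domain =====

-- B replaces A's three priority-ordered scans by one dict-indexed pass collecting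
-- a set of categories, then resolving the fixed priority order (alternative decomposition).


-- ===== PORT A =====
def determine_keyword_type (tokens : List String) : Option String :=
  if tokens.contains "BETWEEN" then some "between"
  else if tokens.any (fun token => token == "LESS" || token == "BELOW") then some "less"
  else if tokens.any (fun token => token == "GREATER" || token == "ABOVE") then some "greater"
  else none

-- ===== PORT B =====
def kwCategory : PySem.Dict String String :=
  PySem.Dict.mk [("BETWEEN", "between"), ("LESS", "less"), ("BELOW", "less"),
   ("GREATER", "greater"), ("ABOVE", "greater")]

def kwPriority : List String := ["between", "less", "greater"]

def determine_keyword_type_alt (tokens : List String) : Option String :=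
  let cats : PySem.Set String :=
    tokens.foldl (fun s t =>
      match PySem.Dict.get? kwCategory t with
      | some c => PySem.Set.add s c
      | none => s) []
  kwPriority.find? (fun cat => PySem.Set.contains cats cat)

-- ===== PRECONDITION & SPEC =====
def Spec_determine_keyword_type (tokens : List String) (out : Option String) : Prop := out = determine_keyword_type_alt tokens
instance (tokens : List String) (out : Option String) : Decidable (Spec_determine_keyword_type tokens out) := by unfold Spec_determine_keyword_type; infer_instance

-- ===== CLAIM (what is proved, stated in full; the proofs are below) =====
def Claim_equal_determine_keyword_type : Prop := ∀ (tokens : List String), Dom_determine_keyword_type tokens → Spec_determine_keyword_type tokens (determine_keyword_type tokens)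

-- ===== LEMMAS AND PROOFS =====

theorem mem_kw_fold (c : String) (tokens : List String) (s : PySem.Set String) :
    c ∈ tokens.foldl (fun s t =>
      match PySem.Dict.get? kwCategory t with
      | some c => PySem.Set.add s c
      | none => s) s ↔ c ∈ s ∨ ∃ t ∈ tokens, PySem.Dict.get? kwCategory t = some c := by
  induction tokens generalizing s with
  | nil => simp
  | cons t ts ih =>
    rcases h : PySem.Dict.get? kwCategory t with _ | c'
    · simp only [List.foldl_cons, h, ih, List.mem_cons]
      constructor
      · rintro (hs | ⟨u, hu, hc⟩)
        · exact Or.inl hs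
        · exact Or.inr ⟨u, Or.inr hu, hc⟩
      · rintro (hs | ⟨u, rfl | hu, hc⟩)
        · exact Or.inl hs
        · rw [h] at hc; cases hc
        · exact Or.inr ⟨u, hu, hc⟩
    · simp only [List.foldl_cons, h, ih, PySem.Set.mem_add]
      constructor
      · rintro ((hs | rfl) | ⟨u, hu, hc⟩)
        · exact Or.inl hs
        · exact Or.inr ⟨t, List.mem_cons_self, h⟩
        · exact Or.inr ⟨u, List.mem_cons_of_mem _ hu, hc⟩
      · rintro (hs | ⟨u, hu, hc⟩)
        · exact Or.inl (Or.inl hs)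
        · rcases List.mem_cons.mp hu with rfl | hu
          · rw [h] at hc
            exact Or.inl (Or.inr (Option.some.inj hc).symm)
          · exact Or.inr ⟨u, hu, hc⟩

theorem kwCategory_get? (t : String) :
    PySem.Dict.get? kwCategory t =
      if t = "BETWEEN" then some "between"
      else if t = "LESS" then some "less"
      else if t = "BELOW" then some "less"
      else if t = "GREATER" then some "greater"
      else if t = "ABOVE" then some "greater"
      else none := by
  simp only [kwCategory, PySem.Dict.get?_mk_cons, beq_iff_eq]
  by_cases h1 : t = "BETWEEN" <;> by_cases h2 : t = "LESS" <;> by_cases h3 : t = "BELOW" <;>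
    by_cases h4 : t = "GREATER" <;> by_cases h5 : t = "ABOVE" <;>
      simp_all [eq_comm, PySem.Dict.get?]

theorem between_iff (tokens : List String) :
    (∃ t ∈ tokens, PySem.Dict.get? kwCategory t = some "between") ↔ "BETWEEN" ∈ tokens := by
  constructor
  · rintro ⟨t, ht, hc⟩; rw [kwCategory_get?] at hc; split_ifs at hc <;> simp_all
  · intro h; exact ⟨"BETWEEN", h, by simp [kwCategory_get?]⟩

theorem less_iff (tokens : List String) :
    (∃ t ∈ tokens, PySem.Dict.get? kwCategory t = some "less") ↔
      ("LESS" ∈ tokens ∨ "BELOW" ∈ tokens) := by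
  constructor
  · rintro ⟨t, ht, hc⟩; rw [kwCategory_get?] at hc; split_ifs at hc <;> simp_all
  · rintro (h | h)
    · exact ⟨"LESS", h, by simp [kwCategory_get?]⟩
    · exact ⟨"BELOW", h, by simp [kwCategory_get?]⟩

theorem greater_iff (tokens : List String) :
    (∃ t ∈ tokens, PySem.Dict.get? kwCategory t = some "greater") ↔
      ("GREATER" ∈ tokens ∨ "ABOVE" ∈ tokens) := by
  constructor
  · rintro ⟨t, ht, hc⟩; rw [kwCategory_get?] at hc; split_ifs at hc <;> simp_all
  · rintro (h | h)
    · exact ⟨"GREATER", h, by simp [kwCategory_get?]⟩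
    · exact ⟨"ABOVE", h, by simp [kwCategory_get?]⟩

theorem any_two (tokens : List String) (a b : String) :
    (tokens.any fun token => token == a || token == b) = true ↔ a ∈ tokens ∨ b ∈ tokens := by
  simp only [List.any_eq_true, Bool.or_eq_true, beq_iff_eq]
  constructor
  · rintro ⟨t, ht, rfl | rfl⟩
    exacts [Or.inl ht, Or.inr ht]
  · rintro (h | h)
    exacts [⟨a, h, Or.inl rfl⟩, ⟨b, h, Or.inr rfl⟩]

theorem a_char (tokens : List String) : determine_keyword_type tokens =
    if "BETWEEN" ∈ tokens then some "between"
    else if "LESS" ∈ tokens ∨ "BELOW" ∈ tokens then some "less"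
    else if "GREATER" ∈ tokens ∨ "ABOVE" ∈ tokens then some "greater"
    else none := by
  unfold determine_keyword_type
  simp only [any_two, List.contains_iff_mem]

theorem b_char (tokens : List String) : determine_keyword_type_alt tokens =
    if "BETWEEN" ∈ tokens then some "between"
    else if "LESS" ∈ tokens ∨ "BELOW" ∈ tokens then some "less"
    else if "GREATER" ∈ tokens ∨ "ABOVE" ∈ tokens then some "greater"
    else none := by
  unfold determine_keyword_type_alt
  have h1 : ("between" ∈ tokens.foldl (fun s t =>
      match PySem.Dict.get? kwCategory t with
      | some c => PySem.Set.add s c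
      | none => s) []) ↔ "BETWEEN" ∈ tokens := by
    rw [mem_kw_fold, between_iff]; simp
  have h2 : ("less" ∈ tokens.foldl (fun s t =>
      match PySem.Dict.get? kwCategory t with
      | some c => PySem.Set.add s c
      | none => s) []) ↔ ("LESS" ∈ tokens ∨ "BELOW" ∈ tokens) := by
    rw [mem_kw_fold, less_iff]; simp
  have h3 : ("greater" ∈ tokens.foldl (fun s t =>
      match PySem.Dict.get? kwCategory t with
      | some c => PySem.Set.add s c
      | none => s) []) ↔ ("GREATER" ∈ tokens ∨ "ABOVE" ∈ tokens) := by
    rw [mem_kw_fold, greater_iff]; simp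
  by_cases hB : "BETWEEN" ∈ tokens <;>
    by_cases hL : "LESS" ∈ tokens ∨ "BELOW" ∈ tokens <;>
      by_cases hG : "GREATER" ∈ tokens ∨ "ABOVE" ∈ tokens <;>
        simp [kwPriority, PySem.Set.contains, h1, h2, h3, hB, hL, hG]

-- ===== VERDICT (by name: the statement is the Claim_ definition above) =====
theorem determine_keyword_type_spec : Claim_equal_determine_keyword_type := by
  intro tokens _
  unfold Spec_determine_keyword_type
  rw [a_char, b_char]
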